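-- pv_equiv track=rewrite | github.com/mcjcode/number-theory | bps.py | bps
-- ===== SOURCE A (Python) =====
-- def bps(xs, n):
--     """
--     For an increasing sequence xs of relatively
--     prime numbers and an upper bound n>=1, compute
--     all of the products <=n of subsets of xs.
--
--     This function proceeds depth first in the tree and
--     is non-recursive (it does not call it self and is not
--     limited by python's recursion depth bound)
--     """
--
--     s = [(1, 0)]
--     lenxs = len(xs)
--     while s:
--         prd, idx = s.pop()
--         if idx < lenxs:
--             x = xs[idx]
--             if x*prd <= n:
--                 s.append((prd,   idx+1))
--                 s.append((prd*x, idx+1))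
--                 continue
--         yield prd
-- ===== SOURCE B (Python) =====
-- def bps(xs, n):
--     """Recursive-generator reimplementation: same yield order as A
--     (include branch explored first)."""
--     lenxs = len(xs)
--     def rec(prd, idx):
--         if idx < lenxs and xs[idx] * prd <= n:
--             yield from rec(prd * xs[idx], idx + 1)
--             yield from rec(prd, idx + 1)
--         else:
--             yield prd
--     yield from rec(1, 0)
-- ===== Notes on version B (the rewrite author's own statement) =====
-- stated objective: simpler
-- what changed: Replaced A's explicit-stack iterative DFS with a short recursive generator rec(prd, idx) that yields from the include branch first, eliminating the hand-managed stack.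
import Mathlib
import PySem

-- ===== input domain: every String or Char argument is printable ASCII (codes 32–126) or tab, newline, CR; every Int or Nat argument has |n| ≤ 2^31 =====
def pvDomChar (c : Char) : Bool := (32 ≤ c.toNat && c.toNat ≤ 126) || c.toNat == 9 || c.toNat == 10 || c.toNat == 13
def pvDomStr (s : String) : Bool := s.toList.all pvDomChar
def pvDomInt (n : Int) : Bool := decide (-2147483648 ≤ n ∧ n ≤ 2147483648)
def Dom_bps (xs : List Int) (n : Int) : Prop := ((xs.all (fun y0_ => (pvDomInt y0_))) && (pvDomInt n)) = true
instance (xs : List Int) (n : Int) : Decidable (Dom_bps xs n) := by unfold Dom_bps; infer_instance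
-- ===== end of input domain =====

-- B replaces A's explicit-stack DFS with a recursive helper (include branch first); same yields, same order.


-- ===== PORT A =====
-- A's explicit-stack DFS loop; stack head = Python list's last element.
-- Measure: sum of 3^(len+1-idx) over the stack (termination only).
def bpsMeasure (L : Nat) (s : List (Int × Nat)) : Nat :=
  (s.map (fun p => 3 ^ (L + 1 - p.2))).sum

def bpsLoop (xs : List Int) (n : Int) : List (Int × Nat) → List Int
  | [] => []
  | (prd, idx) :: s =>
    if h : idx < xs.length then
      let x := xs[idx]
      if x * prd ≤ n then
        bpsLoop xs n ((prd * x, idx + 1) :: (prd, idx + 1) :: s)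
      else
        prd :: bpsLoop xs n s
    else
      prd :: bpsLoop xs n s
termination_by s => bpsMeasure xs.length s
decreasing_by
  · simp only [bpsMeasure, List.map_cons, List.sum_cons]
    have h1 : xs.length + 1 - idx = (xs.length - idx) + 1 := by omega
    have h2 : xs.length + 1 - (idx + 1) = xs.length - idx := by omega
    rw [h1, h2, pow_succ]
    have : 0 < 3 ^ (xs.length - idx) := Nat.pow_pos (by norm_num)
    omega
  · simp only [bpsMeasure, List.map_cons, List.sum_cons]
    have : 0 < 3 ^ (xs.length + 1 - idx) := Nat.pow_pos (by norm_num)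
    omega
  · simp only [bpsMeasure, List.map_cons, List.sum_cons]
    have : 0 < 3 ^ (xs.length + 1 - idx) := Nat.pow_pos (by norm_num)
    omega

def bps (xs : List Int) (n : Int) : List Int := bpsLoop xs n [(1, 0)]

-- ===== PORT B =====
-- B's recursive generator rec(prd, idx): include branch first, then exclude.
-- the short-circuit 'and' of B's guard becomes nested ifs
def bpsRec (xs : List Int) (n : Int) (prd : Int) (idx : Nat) : List Int :=
  if h : idx < xs.length then
    if xs[idx] * prd ≤ n then
      bpsRec xs n (prd * xs[idx]) (idx + 1) ++ bpsRec xs n prd (idx + 1)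
    else
      [prd]
  else
    [prd]
termination_by xs.length - idx
decreasing_by all_goals omega

def bps_alt (xs : List Int) (n : Int) : List Int := bpsRec xs n 1 0


-- ===== PRECONDITION & SPEC =====
def Spec_bps (xs : List Int) (n : Int) (out : List Int) : Prop := out = bps_alt xs n
instance (xs : List Int) (n : Int) (out : List Int) : Decidable (Spec_bps xs n out) := by unfold Spec_bps; infer_instance

-- ===== CLAIM (what is proved, stated in full; the proofs are below) =====
def Claim_equal_bps : Prop := ∀ (xs : List Int) (n : Int), Dom_bps xs n → Spec_bps xs n (bps xs n)

-- ===== LEMMAS AND PROOFS =====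

-- ===== VERDICT (by name: the statement is the Claim_ definition above) =====
-- bpsLoop on a stack is the concatenation of bpsRec over its entries.
theorem bpsLoop_eq_flatMap (xs : List Int) (n : Int) (s : List (Int × Nat)) :
    bpsLoop xs n s = s.flatMap (fun p => bpsRec xs n p.1 p.2) := by
  fun_induction bpsLoop xs n s with
  | case1 => simp
  | case2 prd idx s h x hle ih =>
    rw [ih]
    conv_rhs => rw [List.flatMap_cons, bpsRec]
    rw [dif_pos h, if_pos hle]
    simp only [List.flatMap_cons, List.append_assoc]
    rfl
  | case3 prd idx s h x hle ih =>
    rw [ih]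
    conv_rhs => rw [List.flatMap_cons, bpsRec]
    rw [dif_pos h, if_neg hle]
    simp
  | case4 prd idx s h ih =>
    rw [ih]
    conv_rhs => rw [List.flatMap_cons, bpsRec]
    rw [dif_neg h]
    simp

-- ===== VERDICT =====
theorem bps_spec : Claim_equal_bps := by
  intro xs n _
  unfold Spec_bps bps bps_alt
  rw [bpsLoop_eq_flatMap]
  simp
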